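-- pv_equiv track=rewrite | github.com/DalbaEngenharia/Lan-amento-notas-medi-o | Protheus_Biblioteca.py | encontrar_BTN
-- ===== SOURCE A (Python) =====
-- def encontrar_BTN(ids, nome, qnt):
--     for id in ids:
--         if (nome in id) and (qnt > 0):
--             qnt = qnt - 1
--         elif (nome in id):
--             x = id
--
--             return x
--             break
--         else:
--             None
-- ===== SOURCE B (Python) =====
-- def encontrar_BTN(ids, nome, qnt):
--     ms = [id for id in ids if nome in id]
--     idx = qnt if qnt > 0 else 0
--     return ms[idx] if idx < len(ms) else None
-- ===== Notes on version B (the rewrite author's own statement) =====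
-- stated objective: alternative
-- what changed: Replaces the count-down-with-early-return loop by a filter-then-index decomposition: collect all matching ids, then select element max(qnt,0) directly.
import Mathlib
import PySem

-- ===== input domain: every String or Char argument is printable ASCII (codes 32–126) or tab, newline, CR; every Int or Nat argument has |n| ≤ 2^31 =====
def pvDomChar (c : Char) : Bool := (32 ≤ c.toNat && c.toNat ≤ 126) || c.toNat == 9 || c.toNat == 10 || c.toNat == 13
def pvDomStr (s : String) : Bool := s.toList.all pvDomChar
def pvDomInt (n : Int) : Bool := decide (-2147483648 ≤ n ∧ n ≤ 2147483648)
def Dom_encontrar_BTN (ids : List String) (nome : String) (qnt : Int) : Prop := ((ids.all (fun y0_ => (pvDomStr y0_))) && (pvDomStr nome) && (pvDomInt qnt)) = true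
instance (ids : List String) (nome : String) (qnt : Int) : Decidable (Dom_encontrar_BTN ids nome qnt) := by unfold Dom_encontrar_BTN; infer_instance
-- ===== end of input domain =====

-- B replaces A's count-down-with-early-return loop by a filter-then-index decomposition (alternative, same cost).
-- ===== PORT A =====
def encontrar_BTN (ids : List String) (nome : String) (qnt : Int) : Option String :=
  match ids with
  | [] => none
  | id :: rest =>
    if PySem.Str.isIn nome id ∧ qnt > 0 then
      encontrar_BTN rest nome (qnt - 1)
    else if PySem.Str.isIn nome id then
      some id
    else
      encontrar_BTN rest nome qnt

-- ===== PORT B =====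
def encontrar_BTN_alt (ids : List String) (nome : String) (qnt : Int) : Option String :=
  let ms := ids.filter (fun id => PySem.Str.isIn nome id)
  let idx : Int := if qnt > 0 then qnt else 0
  if idx < (ms.length : Int) then PySem.List.pyGet? ms idx else none

-- ===== PRECONDITION & SPEC =====
def Spec_encontrar_BTN (ids : List String) (nome : String) (qnt : Int) (out : Option String) : Prop := out = encontrar_BTN_alt ids nome qnt
instance (ids : List String) (nome : String) (qnt : Int) (out : Option String) : Decidable (Spec_encontrar_BTN ids nome qnt out) := by unfold Spec_encontrar_BTN; infer_instance

-- ===== CLAIM (what is proved, stated in full; the proofs are below) =====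
def Claim_equal_encontrar_BTN : Prop := ∀ (ids : List String) (nome : String) (qnt : Int), Dom_encontrar_BTN ids nome qnt → Spec_encontrar_BTN ids nome qnt (encontrar_BTN ids nome qnt)

-- ===== LEMMAS AND PROOFS =====

-- A's loop computes element max(qnt,0) of the list of matching ids.
lemma encontrar_BTN_eq_filter_get (nome : String) :
    ∀ (ids : List String) (qnt : Int),
      encontrar_BTN ids nome qnt
        = (ids.filter (fun id => PySem.Str.isIn nome id))[(max qnt 0).toNat]? := by
  intro ids
  induction ids with
  | nil => intro qnt; simp [encontrar_BTN]
  | cons id rest ih =>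
    intro qnt
    simp only [encontrar_BTN]
    by_cases h : PySem.Str.isIn nome id = true
    · rw [List.filter_cons_of_pos h]
      by_cases hq : qnt > 0
      · rw [if_pos ⟨h, hq⟩]
        have hidx : (max qnt 0).toNat = (max (qnt - 1) 0).toNat + 1 := by omega
        rw [hidx, List.getElem?_cons_succ]
        exact ih (qnt - 1)
      · rw [if_neg (by tauto), if_pos h]
        have hidx : (max qnt 0).toNat = 0 := by omega
        rw [hidx]
        simp
    · rw [List.filter_cons_of_neg (by simpa using h), if_neg (by tauto), if_neg h]
      exact ih qnt

-- B also computes element max(qnt,0) of the ms list.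
lemma encontrar_BTN_alt_eq_filter_get (ids : List String) (nome : String) (qnt : Int) :
    encontrar_BTN_alt ids nome qnt
      = (ids.filter (fun id => PySem.Str.isIn nome id))[(max qnt 0).toNat]? := by
  unfold encontrar_BTN_alt
  set m := ids.filter (fun id => PySem.Str.isIn nome id) with hm
  have hidx : (if qnt > 0 then qnt else 0) = max qnt 0 := by
    split <;> omega
  rw [hidx]
  by_cases hlt : max qnt 0 < (m.length : Int)
  · simp only [hlt, if_true]
    rw [PySem.List.pyGet?_of_nonneg _ (by omega)]
  · simp only [hlt, if_false]
    have : m.length ≤ (max qnt 0).toNat := by omega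
    exact (List.getElem?_eq_none this).symm

-- ===== VERDICT (by name: the statement is the Claim_ definition above) =====
theorem encontrar_BTN_spec : Claim_equal_encontrar_BTN := by
  intro ids nome qnt _
  unfold Spec_encontrar_BTN
  rw [encontrar_BTN_eq_filter_get, encontrar_BTN_alt_eq_filter_get]
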